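-- pv_equiv track=rewrite | github.com/minivess-mlops/minivess-mlops | src/minivess/compute/gpu_benchmark.py | normalize_gpu_name
-- ===== SOURCE A (Python) =====
-- def normalize_gpu_name(raw_name: str) -> str:
--     """Normalize GPU model name to canonical form (RC11).
--
--     Examples
--     --------
--     >>> normalize_gpu_name("NVIDIA GeForce RTX 2070 SUPER")
--     'rtx_2070_super'
--     >>> normalize_gpu_name("NVIDIA A100-SXM4-80GB")
--     'a100_sxm4_80gb'
--     """
--     if not raw_name.strip():
--         return "unknown_gpu"
--
--     name = raw_name.strip()
--     # Strip common prefixes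
--     for prefix in ("NVIDIA GeForce ", "NVIDIA "):
--         if name.startswith(prefix):
--             name = name[len(prefix) :]
--             break
--
--     # Lowercase, replace spaces and hyphens with underscores
--     name = name.lower().replace(" ", "_").replace("-", "_")
--
--     # Collapse multiple underscores
--     while "__" in name:
--         name = name.replace("__", "_")
--
--     return name.strip("_")
-- ===== SOURCE B (Python) =====
-- def normalize_gpu_name(raw_name: str) -> str:
--     name = raw_name.strip()
--     if not name:
--         return "unknown_gpu"
--     for prefix in ("NVIDIA GeForce ", "NVIDIA "):
--         if name.startswith(prefix):
--             name = name[len(prefix):]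
--             break
--     out = []
--     pending = False
--     for ch in name.lower():
--         if ch in " -_":
--             pending = bool(out)
--         else:
--             if pending:
--                 out.append("_")
--             out.append(ch)
--             pending = False
--     return "".join(out)
-- ===== Notes on version B (the rewrite author's own statement) =====
-- stated objective: alternative
-- what changed: Replaces A's replace-spaces/hyphens + while-loop '__' collapse + strip('_') post-processing with a single-pass state machine that emits one underscore between runs of separator characters, never materializing intermediate strings.
import Mathlib
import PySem

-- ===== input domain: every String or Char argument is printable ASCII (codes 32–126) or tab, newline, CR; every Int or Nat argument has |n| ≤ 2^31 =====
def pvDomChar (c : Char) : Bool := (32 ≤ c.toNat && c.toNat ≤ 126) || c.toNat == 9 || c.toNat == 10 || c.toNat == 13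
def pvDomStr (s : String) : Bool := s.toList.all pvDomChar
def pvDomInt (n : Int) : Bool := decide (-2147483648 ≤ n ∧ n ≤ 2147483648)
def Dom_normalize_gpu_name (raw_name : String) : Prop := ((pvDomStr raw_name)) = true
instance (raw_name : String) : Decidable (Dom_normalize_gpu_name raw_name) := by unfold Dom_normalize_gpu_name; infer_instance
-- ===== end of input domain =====

-- B replaces A's replace-spaces/hyphens + while-loop '__' collapse + strip('_') post-processing
-- with a single left-to-right state machine emitting one '_' between separator runs (alternative decomposition).

-- ===== PORT A =====
-- the 'while "__" in name: name = name.replace("__", "_")' loop; fuel = length makes it total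
-- (each iteration with "__" present strictly shrinks the string, proved in pvLoop_spec below)
def pvCollapseLoopA : Nat → String → String
  | 0, s => s
  | fuel + 1, s =>
    if PySem.Str.isIn "__" s then pvCollapseLoopA fuel (PySem.Str.replace s "__" "_") else s

def normalize_gpu_name (raw_name : String) : String :=
  if PySem.Str.strip raw_name = "" then "unknown_gpu"
  else
    let name0 := PySem.Str.strip raw_name
    let name1 :=
      if PySem.Str.startswith name0 "NVIDIA GeForce " then PySem.Str.slice name0 (some 15) none
      else if PySem.Str.startswith name0 "NVIDIA " then PySem.Str.slice name0 (some 7) none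
      else name0
    let name2 := PySem.Str.replace (PySem.Str.replace (PySem.Str.lower name1) " " "_") "-" "_"
    PySem.Str.stripChars (pvCollapseLoopA name2.toList.length name2) "_"

-- ===== PORT B =====
-- the single-pass machine of Source B: out is the accumulated output, pending records whether a
-- separator run is open after at least one emitted character
def pvScanB : List Char → List Char → Bool → List Char
  | [], out, _ => out
  | c :: t, out, pending =>
    if c = ' ' ∨ c = '-' ∨ c = '_' then pvScanB t out (!out.isEmpty)
    else pvScanB t (out ++ (if pending then ['_'] else []) ++ [c]) false

def normalize_gpu_name_alt (raw_name : String) : String :=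
  let name := PySem.Str.strip raw_name
  if name = "" then "unknown_gpu"
  else
    let name1 :=
      if PySem.Str.startswith name "NVIDIA GeForce " then PySem.Str.slice name (some 15) none
      else if PySem.Str.startswith name "NVIDIA " then PySem.Str.slice name (some 7) none
      else name
    String.ofList (pvScanB (PySem.Str.lower name1).toList [] false)

-- ===== PRECONDITION & SPEC =====
def Spec_normalize_gpu_name (raw_name : String) (out : String) : Prop := out = normalize_gpu_name_alt raw_name
instance (raw_name : String) (out : String) : Decidable (Spec_normalize_gpu_name raw_name out) := by unfold Spec_normalize_gpu_name; infer_instance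

-- ===== CLAIM (what is proved, stated in full; the proofs are below) =====
def Claim_equal_normalize_gpu_name : Prop := ∀ (raw_name : String), Dom_normalize_gpu_name raw_name → Spec_normalize_gpu_name raw_name (normalize_gpu_name raw_name)

-- ===== LEMMAS AND PROOFS =====
def pvRepl2 : List Char → List Char
  | [] => []
  | [c] => [c]
  | a :: b :: t => if a = '_' ∧ b = '_' then '_' :: pvRepl2 t else a :: pvRepl2 (b :: t)

theorem pvGo_dd : ∀ (fuel : Nat) (l acc : List Char), l.length ≤ fuel →
    PySem.Chars.replace.go ['_', '_'] ['_'] fuel l acc = acc.reverse ++ pvRepl2 l := by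
  intro fuel
  induction fuel with
  | zero =>
    intro l acc h
    have : l = [] := List.length_eq_zero_iff.mp (Nat.le_zero.mp h)
    subst this
    simp [PySem.Chars.replace.go, pvRepl2]
  | succ n ih =>
    intro l acc h
    cases l with
    | nil => simp [PySem.Chars.replace.go, pvRepl2]
    | cons x t =>
      by_cases hdd : ['_', '_'].isPrefixOf (x :: t) = true
      · obtain ⟨x2, t2, rfl⟩ : ∃ x2 t2, t = x2 :: t2 := by
          cases t with
          | nil => simp [List.isPrefixOf] at hdd
          | cons a b => exact ⟨a, b, rfl⟩
        have hx : x = '_' ∧ x2 = '_' := by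
          have := (by simpa [List.isPrefixOf] using hdd : '_' = x ∧ '_' = x2)
          exact ⟨this.1.symm, this.2.symm⟩
        obtain ⟨rfl, rfl⟩ := hx
        simp only [PySem.Chars.replace.go, hdd, if_pos]
        rw [show List.drop (['_','_'] : List Char).length ('_' :: '_' :: t2) = t2 from by simp]
        rw [ih t2 (['_'].reverse ++ acc) (by simp at h ⊢; omega)]
        simp [pvRepl2]
      · simp only [PySem.Chars.replace.go, hdd, if_neg, Bool.false_eq_true, not_false_iff]
        rw [ih t (x :: acc) (by simp at h ⊢; omega)]
        have hr : pvRepl2 (x :: t) = x :: pvRepl2 t := by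
          cases t with
          | nil => simp [pvRepl2]
          | cons a b =>
            have : ¬ (x = '_' ∧ a = '_') := by
              intro ⟨h1, h2⟩; subst h1; subst h2; simp [List.isPrefixOf] at hdd
            simp [pvRepl2, this]
        rw [hr]; simp

theorem pvReplace_dd (l : List Char) : PySem.Chars.replace l ['_', '_'] ['_'] = pvRepl2 l := by
  rw [PySem.Chars.replace]
  simp only [List.isEmpty]
  rw [pvGo_dd l.length l [] le_rfl]
  simp

theorem pvGo_single (c d : Char) : ∀ (fuel : Nat) (l acc : List Char), l.length ≤ fuel →
    PySem.Chars.replace.go [c] [d] fuel l acc = acc.reverse ++ l.map (fun x => if x = c then d else x) := by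
  intro fuel
  induction fuel with
  | zero =>
    intro l acc h
    have : l = [] := List.length_eq_zero_iff.mp (Nat.le_zero.mp h)
    subst this
    simp [PySem.Chars.replace.go]
  | succ n ih =>
    intro l acc h
    cases l with
    | nil => simp [PySem.Chars.replace.go]
    | cons x t =>
      have ht : t.length ≤ n := by simpa using Nat.lt_succ_iff.mp (by simpa using h)
      by_cases hx : x = c
      · subst hx
        have hpre : [x].isPrefixOf (x :: t) = true := by simp [List.isPrefixOf]
        simp only [PySem.Chars.replace.go, hpre, if_pos]
        rw [show List.drop [x].length (x :: t) = t from by simp]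
        rw [ih t ([d].reverse ++ acc) ht]
        simp
      · have hpre : [c].isPrefixOf (x :: t) = false := by simp [List.isPrefixOf]; exact fun he => hx he.symm
        simp only [PySem.Chars.replace.go, hpre, if_neg, Bool.false_eq_true, not_false_iff]
        rw [ih t (x :: acc) ht]
        simp [hx]

theorem pvReplace_single (s : List Char) (c d : Char) :
    PySem.Chars.replace s [c] [d] = s.map (fun x => if x = c then d else x) := by
  rw [PySem.Chars.replace]
  simp only [List.isEmpty]
  rw [pvGo_single c d s.length s [] le_rfl]
  simp

theorem pvRepl2_length_le (l : List Char) : (pvRepl2 l).length ≤ l.length := by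
  induction l using pvRepl2.induct with
  | case1 => simp [pvRepl2]
  | case2 c => simp [pvRepl2]
  | case3 a b t h ih => simp only [pvRepl2, if_pos h]; simp at ih ⊢; omega
  | case4 a b t h ih => simp only [pvRepl2, if_neg h]; simp at ih ⊢; omega

theorem pvRepl2_length_lt (l : List Char) (h : ['_', '_'] <:+: l) : (pvRepl2 l).length < l.length := by
  induction l using pvRepl2.induct with
  | case1 => simp at h
  | case2 c => have := h.length_le; simp at this
  | case3 a b t hab ih =>
    have := pvRepl2_length_le t
    simp only [pvRepl2, if_pos hab]; simp at this ⊢; omega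
  | case4 a b t hab ih =>
    have hbt : ['_', '_'] <:+: b :: t := by
      rcases List.infix_cons_iff.mp h with hp | hi
      · exfalso
        rcases hp with ⟨r, hr⟩
        simp at hr
        exact hab ⟨hr.1.symm, hr.2.1.symm⟩
      · exact hi
    simp only [pvRepl2, if_neg hab]
    have := ih hbt
    simp at this ⊢; omega

theorem pvRepl2_head? (l : List Char) : (pvRepl2 l).head? = l.head? := by
  induction l using pvRepl2.induct with
  | case1 => rfl
  | case2 c => rfl
  | case3 a b t h => simp [pvRepl2, h.1, h.2]
  | case4 a b t h ih => simp [pvRepl2, if_neg h]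

def pvSqueeze : List Char → List Char
  | [] => []
  | [c] => [c]
  | a :: b :: t => if a = '_' ∧ b = '_' then pvSqueeze (b :: t) else a :: pvSqueeze (b :: t)

theorem pvSqueeze_cons (c : Char) (u : List Char) :
    pvSqueeze (c :: u) = if c = '_' ∧ u.head? = some '_' then pvSqueeze u else c :: pvSqueeze u := by
  cases u with
  | nil => simp [pvSqueeze]
  | cons b t => simp [pvSqueeze]

theorem pvSqueeze_repl2 (l : List Char) : pvSqueeze (pvRepl2 l) = pvSqueeze l := by
  induction l using pvRepl2.induct with
  | case1 => rfl
  | case2 c => rfl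
  | case3 a b t hab ih =>
    obtain ⟨rfl, rfl⟩ := hab
    rw [show pvRepl2 ('_' :: '_' :: t) = '_' :: pvRepl2 t from by simp [pvRepl2]]
    rw [pvSqueeze_cons '_' (pvRepl2 t), pvRepl2_head?, ih]
    rw [show pvSqueeze ('_' :: '_' :: t) = pvSqueeze ('_' :: t) from by simp [pvSqueeze]]
    rw [pvSqueeze_cons '_' t]
  | case4 a b t hab ih =>
    have hbr : pvRepl2 (a :: b :: t) = a :: pvRepl2 (b :: t) := by simp [pvRepl2, if_neg hab]
    rw [hbr, pvSqueeze_cons a (pvRepl2 (b :: t)), pvRepl2_head?, ih, pvSqueeze_cons a (b :: t)]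

theorem pvSqueeze_noDD (l : List Char) (h : ¬ ['_', '_'] <:+: l) : pvSqueeze l = l := by
  induction l using pvSqueeze.induct with
  | case1 => rfl
  | case2 c => rfl
  | case3 a b t hab ih => exact absurd (List.IsPrefix.isInfix ⟨t, by simp [hab.1, hab.2]⟩) h
  | case4 a b t hab ih =>
    have : ¬ ['_', '_'] <:+: b :: t := fun hi => h (hi.trans (List.suffix_cons a (b :: t)).isInfix)
    simp [pvSqueeze, if_neg hab, ih this]

theorem pvLoop_spec : ∀ (fuel : Nat) (s : String), s.toList.length ≤ fuel →
    ¬ ['_', '_'] <:+: (pvCollapseLoopA fuel s).toList ∧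
    pvSqueeze (pvCollapseLoopA fuel s).toList = pvSqueeze s.toList := by
  intro fuel
  induction fuel with
  | zero =>
    intro s h
    have : s.toList = [] := List.length_eq_zero_iff.mp (Nat.le_zero.mp h)
    constructor
    · rw [pvCollapseLoopA, this]; intro hi; have := hi.length_le; simp at this
    · rfl
  | succ n ih =>
    intro s h
    by_cases hin : PySem.Str.isIn "__" s = true
    · have hinf : ['_', '_'] <:+: s.toList := by
        have := (PySem.Chars.isIn_iff_infix "__".toList s.toList).mp (by rw [← PySem.Str.isIn_eq]; exact hin)
        simpa using this
      have hrep : (PySem.Str.replace s "__" "_").toList = pvRepl2 s.toList := by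
        rw [PySem.Str.toList_replace]
        have : ("__" : String).toList = ['_', '_'] := by decide
        have h2 : ("_" : String).toList = ['_'] := by decide
        rw [this, h2, pvReplace_dd]
      have hlen : (PySem.Str.replace s "__" "_").toList.length ≤ n := by
        rw [hrep]
        have := pvRepl2_length_lt s.toList hinf
        omega
      have := ih (PySem.Str.replace s "__" "_") hlen
      rw [show pvCollapseLoopA (n+1) s = pvCollapseLoopA n (PySem.Str.replace s "__" "_") from by
        rw [pvCollapseLoopA, if_pos hin]]
      exact ⟨this.1, by rw [this.2, hrep, pvSqueeze_repl2]⟩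
    · rw [show pvCollapseLoopA (n+1) s = s from by rw [pvCollapseLoopA, if_neg hin]]
      refine ⟨?_, rfl⟩
      intro hi
      apply hin
      rw [PySem.Str.isIn_eq]
      apply (PySem.Chars.isIn_iff_infix "__".toList s.toList).mpr
      simpa using hi

def pvP (c : Char) : Bool := decide (c = '_')

theorem pvDropWhile_squeeze (w : List Char) :
    List.dropWhile pvP (pvSqueeze w) = pvSqueeze (List.dropWhile pvP w) := by
  induction w using pvSqueeze.induct with
  | case1 => rfl
  | case2 c => by_cases hc : c = '_' <;> simp [pvSqueeze, pvP, hc]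
  | case3 a b t hab ih =>
    obtain ⟨rfl, rfl⟩ := hab
    rw [show pvSqueeze ('_' :: '_' :: t) = pvSqueeze ('_' :: t) from by simp [pvSqueeze]]
    rw [ih]
    simp [pvP]
  | case4 a b t hab ih =>
    rw [show pvSqueeze (a :: b :: t) = a :: pvSqueeze (b :: t) from by simp [pvSqueeze, hab]]
    by_cases ha : a = '_'
    · subst ha
      have hb : ¬ b = '_' := fun hb => hab ⟨rfl, hb⟩
      rw [show List.dropWhile pvP ('_' :: pvSqueeze (b :: t)) = List.dropWhile pvP (pvSqueeze (b :: t)) from by simp [pvP]]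
      rw [ih]
      rw [show List.dropWhile pvP ('_' :: b :: t) = List.dropWhile pvP (b :: t) from by simp [pvP]]
    · have h1 : List.dropWhile pvP (a :: pvSqueeze (b :: t)) = a :: pvSqueeze (b :: t) := by
        simp [List.dropWhile, pvP, ha]
      have h2 : List.dropWhile pvP (a :: b :: t) = a :: b :: t := by
        simp [List.dropWhile, pvP, ha]
      rw [h1, h2]
      simp [pvSqueeze, hab]

def pvG : List Char → Bool → List Char
  | [], _ => []
  | c :: t, pending => if c = '_' then pvG t true else (if pending then ['_'] else []) ++ c :: pvG t false

def pvM : List Char → List Char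
  | [] => []
  | c :: t => if c = '_' then pvG t true else c :: pvG t false

def pvRstr (u : List Char) : List Char := (List.dropWhile pvP u.reverse).reverse

theorem pvRstr_cons_nonsep (c : Char) (u : List Char) (h : ¬ c = '_') :
    pvRstr (c :: u) = c :: pvRstr u := by
  unfold pvRstr
  rw [List.reverse_cons, List.dropWhile_append]
  by_cases he : (List.dropWhile pvP u.reverse).isEmpty = true
  · rw [if_pos he]
    have h0 : List.dropWhile pvP [c] = [c] := by simp [List.dropWhile, pvP, h]
    have h1 : List.dropWhile pvP u.reverse = [] := by simpa using he
    rw [h0, h1]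
    simp
  · rw [if_neg he]
    simp

theorem pvRstr_cons_sep (u : List Char) :
    pvRstr ('_' :: u) = if pvRstr u = [] then [] else '_' :: pvRstr u := by
  unfold pvRstr
  rw [List.reverse_cons, List.dropWhile_append]
  by_cases he : (List.dropWhile pvP u.reverse).isEmpty = true
  · rw [if_pos he]
    have : List.dropWhile pvP u.reverse = [] := by simpa using he
    simp [List.dropWhile, pvP, this]
  · rw [if_neg he]
    have hne : List.dropWhile pvP u.reverse ≠ [] := by simpa using he
    rw [if_neg (by simpa using hne)]
    simp

theorem pvG_false (v : List Char) : pvG v false = pvM v := by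
  cases v with
  | nil => rfl
  | cons c t => by_cases hc : c = '_' <;> simp [pvG, pvM, hc]

theorem pvRstr_squeeze (w : List Char) : pvRstr (pvSqueeze w) = pvM w := by
  induction w using pvSqueeze.induct with
  | case1 => rfl
  | case2 c =>
    by_cases hc : c = '_'
    · subst hc; simp [pvSqueeze, pvRstr, List.dropWhile, pvP, pvM, pvG]
    · show pvRstr [c] = pvM [c]
      rw [pvRstr_cons_nonsep c [] hc]
      simp [pvRstr, pvM, pvG, hc]
  | case3 a b t hab ih =>
    obtain ⟨rfl, rfl⟩ := hab
    rw [show pvSqueeze ('_' :: '_' :: t) = pvSqueeze ('_' :: t) from by simp [pvSqueeze]]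
    rw [ih]
    simp [pvM, pvG]
  | case4 a b t hab ih =>
    rw [show pvSqueeze (a :: b :: t) = a :: pvSqueeze (b :: t) from by simp [pvSqueeze, hab]]
    by_cases ha : a = '_'
    · subst ha
      have hb : ¬ b = '_' := fun hb => hab ⟨rfl, hb⟩
      rw [pvRstr_cons_sep, ih]
      have hMne : pvM (b :: t) = b :: pvG t false := by simp [pvM, hb]
      rw [if_neg (by rw [hMne]; simp)]
      rw [hMne]
      show _ = pvG ('_' :: b :: t) true
      rw [show pvG ('_' :: b :: t) true = pvG (b :: t) true from by simp [pvG]]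
      simp [pvG, hb]
    · rw [pvRstr_cons_nonsep a _ ha, ih]
      show _ = pvM (a :: b :: t)
      rw [show pvM (a :: b :: t) = a :: pvG (b :: t) false from by simp [pvM, ha]]
      rw [pvG_false]

theorem pvStripChars_eq (l : List Char) :
    PySem.Chars.stripChars l ['_'] = pvRstr (List.dropWhile pvP l) := by
  unfold PySem.Chars.stripChars pvRstr
  have hp : (fun c => (['_'] : List Char).contains c) = pvP := by
    funext c
    by_cases hc : c = '_' <;> simp [pvP, hc]
  rw [hp]

def pvSep (c : Char) : Bool := decide (c = ' ' ∨ c = '-' ∨ c = '_')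
def pvSubst (c : Char) : Char := if pvSep c then '_' else c

theorem pvScanB_phase2 : ∀ (t out : List Char) (pending : Bool), out ≠ [] →
    pvScanB t out pending = out ++ pvG (t.map pvSubst) pending := by
  intro t
  induction t with
  | nil => intro out pending h; simp [pvScanB, pvG]
  | cons c t ih =>
    intro out pending h
    by_cases hc : c = ' ' ∨ c = '-' ∨ c = '_'
    · rw [pvScanB, if_pos hc]
      rw [ih out (!out.isEmpty) h]
      have hsub : pvSubst c = '_' := by simp [pvSubst, pvSep, hc]
      have hout : (!out.isEmpty) = true := by simpa using h
      rw [hout]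
      simp only [List.map_cons, hsub]
      rw [show pvG ('_' :: t.map pvSubst) pending = pvG (t.map pvSubst) true from by simp [pvG]]
    · rw [pvScanB, if_neg hc]
      rw [ih (out ++ (if pending then ['_'] else []) ++ [c]) false (by simp)]
      have hsub : pvSubst c = c := by simp [pvSubst, pvSep, hc]
      have hcu : ¬ c = '_' := fun he => hc (Or.inr (Or.inr he))
      simp only [List.map_cons, hsub]
      rw [show pvG (c :: t.map pvSubst) pending
            = (if pending then ['_'] else []) ++ c :: pvG (t.map pvSubst) false from by
        rw [pvG, if_neg hcu]]
      simp

theorem pvScanB_phase1 : ∀ (l : List Char),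
    pvScanB l [] false = pvM (List.dropWhile pvP (l.map pvSubst)) := by
  intro l
  induction l with
  | nil => rfl
  | cons c t ih =>
    by_cases hc : c = ' ' ∨ c = '-' ∨ c = '_'
    · rw [pvScanB, if_pos hc]
      simp only [List.isEmpty_nil, Bool.not_true]
      rw [ih]
      have hsub : pvSubst c = '_' := by simp [pvSubst, pvSep, hc]
      simp only [List.map_cons, hsub]
      rw [show List.dropWhile pvP ('_' :: t.map pvSubst) = List.dropWhile pvP (t.map pvSubst) from by
        simp [List.dropWhile, pvP]]
    · rw [pvScanB, if_neg hc]
      have hsub : pvSubst c = c := by simp [pvSubst, pvSep, hc]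
      have hcu : ¬ c = '_' := fun he => hc (Or.inr (Or.inr he))
      rw [pvScanB_phase2 t ([] ++ (if false then ['_'] else []) ++ [c]) false (by simp)]
      simp only [List.map_cons, hsub]
      rw [show List.dropWhile pvP (c :: t.map pvSubst) = c :: t.map pvSubst from by
        simp [List.dropWhile, pvP, hcu]]
      rw [show pvM (c :: t.map pvSubst) = c :: pvG (t.map pvSubst) false from by simp [pvM, hcu]]
      simp

theorem pvSubst_comp (c : Char) :
    (if (if c = ' ' then '_' else c) = '-' then '_' else (if c = ' ' then '_' else c)) = pvSubst c := by
  by_cases h1 : c = ' '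
  · simp [h1, pvSubst, pvSep]
  · by_cases h2 : c = '-'
    · simp [h2, pvSubst, pvSep]
    · have : pvSubst c = if c = '_' then '_' else c := by
        by_cases h3 : c = '_' <;> simp [pvSubst, pvSep, h1, h2, h3]
      rw [this]
      by_cases h3 : c = '_' <;> simp [h1, h2, h3]

theorem pvSideA (name1 : String) :
    (PySem.Str.stripChars
      (pvCollapseLoopA
        (PySem.Str.replace (PySem.Str.replace (PySem.Str.lower name1) " " "_") "-" "_").toList.length
        (PySem.Str.replace (PySem.Str.replace (PySem.Str.lower name1) " " "_") "-" "_")) "_").toList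
    = pvM (List.dropWhile pvP ((PySem.Str.lower name1).toList.map pvSubst)) := by
  set n2 := PySem.Str.replace (PySem.Str.replace (PySem.Str.lower name1) " " "_") "-" "_" with hn2
  have hw : n2.toList = (PySem.Str.lower name1).toList.map pvSubst := by
    rw [hn2, PySem.Str.toList_replace, PySem.Str.toList_replace]
    rw [show (" " : String).toList = [' '] from by decide,
        show ("-" : String).toList = ['-'] from by decide,
        show ("_" : String).toList = ['_'] from by decide]
    rw [pvReplace_single, pvReplace_single, List.map_map]
    apply List.map_congr_left
    intro c _
    exact pvSubst_comp c
  obtain ⟨hnd, hsq⟩ := pvLoop_spec n2.toList.length n2 le_rfl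
  have ht : (pvCollapseLoopA n2.toList.length n2).toList
      = pvSqueeze ((PySem.Str.lower name1).toList.map pvSubst) := by
    rw [← hw, ← hsq, pvSqueeze_noDD _ hnd]
  rw [PySem.Str.toList_stripChars, show ("_" : String).toList = ['_'] from by decide]
  rw [pvStripChars_eq, ht, pvDropWhile_squeeze, pvRstr_squeeze]

theorem pvFinal (raw : String) :
    (if PySem.Str.strip raw = "" then "unknown_gpu"
      else
        let name0 := PySem.Str.strip raw
        let name1 :=
          if PySem.Str.startswith name0 "NVIDIA GeForce " then PySem.Str.slice name0 (some 15) none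
          else if PySem.Str.startswith name0 "NVIDIA " then PySem.Str.slice name0 (some 7) none
          else name0
        let name2 := PySem.Str.replace (PySem.Str.replace (PySem.Str.lower name1) " " "_") "-" "_"
        PySem.Str.stripChars (pvCollapseLoopA name2.toList.length name2) "_")
    = (let name := PySem.Str.strip raw
       if name = "" then "unknown_gpu"
       else
         let name1 :=
           if PySem.Str.startswith name "NVIDIA GeForce " then PySem.Str.slice name (some 15) none
           else if PySem.Str.startswith name "NVIDIA " then PySem.Str.slice name (some 7) none
           else name
         String.ofList (pvScanB (PySem.Str.lower name1).toList [] false)) := by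
  by_cases h : PySem.Str.strip raw = ""
  · simp [h]
  · simp only [if_neg h]
    apply String.toList_inj.mp
    rw [pvSideA, pvScanB_phase1]
    simp


-- ===== VERDICT (by name: the statement is the Claim_ definition above) =====
theorem normalize_gpu_name_spec : Claim_equal_normalize_gpu_name := by
  intro raw_name _
  unfold Spec_normalize_gpu_name normalize_gpu_name normalize_gpu_name_alt
  exact pvFinal raw_name
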